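-- pv_equiv track=rewrite | github.com/TarhunchiKKK/vlados | lab2/bitstaffing.py | bit_staffing
-- ===== SOURCE A (Python) =====
-- flag: str = '00010010'          # исходный флаг
--
-- new_flag: str = '00010011'      # флаг после бит стаффинга
--
-- def bit_staffing(data: str) -> str:
--     # строка после бит-стаффинга
--     staffed_data: str = ''
--     # индекс, от которого начинаем искать очередной flag
--     old_index: int = 8
--     # ищем flag
--     while(True):
--         # ищем позицию вхождения очередного flag начиная с индекса old_index
--         new_index = data.find(flag, old_index)
--         # если флаг не найден - заканчиваем
--         if new_index == -1:
--             break
--         # добавить кусок строки до очередного флага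
--         staffed_data += data[old_index:new_index:1]
--         # добавить new_flag вместо flag
--         staffed_data += new_flag
--         # пропускаем 8 для того чтобы пропустить найденный флаг, иначе рискуем снова на него напороться
--         old_index = new_index + 8
--     return staffed_data
-- ===== SOURCE B (Python) =====
-- flag: str = '00010010'          # original flag
--
-- new_flag: str = '00010011'      # flag after bit stuffing
--
-- def bit_staffing(data: str) -> str:
--     # Split the region after the 8-char header on the flag; each flag becomes
--     # new_flag and the segment after the last flag is dropped.
--     parts = data[8:].split(flag)
--     if len(parts) == 1:
--         return ''
--     return new_flag.join(parts[:-1]) + new_flag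
-- ===== Notes on version B (the rewrite author's own statement) =====
-- stated objective: simpler
-- what changed: The manual while-True find/skip scan with an old_index cursor and string concatenation is replaced by a single split of data[8:] on the flag followed by a new_flag join of all segments but the last; no index arithmetic remains.
import Mathlib
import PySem

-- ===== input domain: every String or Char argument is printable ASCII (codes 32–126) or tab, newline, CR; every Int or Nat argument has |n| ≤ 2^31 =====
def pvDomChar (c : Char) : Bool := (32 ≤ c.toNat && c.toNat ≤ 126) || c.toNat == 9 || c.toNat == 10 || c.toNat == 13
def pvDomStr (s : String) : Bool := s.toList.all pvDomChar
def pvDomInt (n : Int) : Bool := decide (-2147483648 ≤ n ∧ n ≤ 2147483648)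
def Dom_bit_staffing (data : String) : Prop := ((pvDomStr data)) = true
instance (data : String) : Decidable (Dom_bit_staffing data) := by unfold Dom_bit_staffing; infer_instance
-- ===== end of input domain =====

-- B replaces A's manual while-True find/skip scan with one split of data[8:] on the
-- flag and a new_flag-join of all parts but the last (objective: simpler).

-- the module constants, as code-point lists (strings are handled on the List Char side per PySem)
def pvFlag : List Char := "00010010".toList        -- flag
def pvNewFlag : List Char := "00010011".toList     -- new_flag

-- ===== PORT A =====
-- the 'while True' loop of A: state (staffed_data, old_index); fuel only bounds the
-- iteration count (old_index grows by at least 8 per step, so len(data)+1 steps never run out)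
def bitStaffingGo (data : List Char) (fuel : Nat) (staffedData : List Char) (oldIndex : Int) : List Char :=
  match fuel with
  | 0 => staffedData                                              -- unreachable with the fuel below
  | fuel + 1 =>
    -- new_index = data.find(flag, old_index)
    let newIndex := PySem.Chars.findFrom data pvFlag oldIndex none
    if newIndex = -1 then staffedData                             -- break → return staffed_data
    else
      -- staffed_data += data[old_index:new_index:1] + new_flag  (a step-1 slice is the plain slice)
      bitStaffingGo data fuel (staffedData ++ PySem.List.slice data (some oldIndex) (some newIndex) ++ pvNewFlag)
        (newIndex + 8)                                            -- old_index = new_index + 8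

def bit_staffing (data : String) : String :=
  String.ofList (bitStaffingGo data.toList (data.toList.length + 1) [] 8)

-- ===== PORT B =====
def bit_staffing_alt (data : String) : String :=
  -- parts = data[8:].split(flag)   (flag is nonempty, so split is Chars.splitOn)
  let parts := PySem.Chars.splitOn (PySem.List.slice data.toList (some 8) none) pvFlag
  if parts.length = 1 then ""                                     -- no flag found
  else String.ofList (PySem.Chars.join pvNewFlag parts.dropLast ++ pvNewFlag)

-- ===== PRECONDITION & SPEC =====
def Spec_bit_staffing (data : String) (out : String) : Prop := out = bit_staffing_alt data
instance (data : String) (out : String) : Decidable (Spec_bit_staffing data out) := by unfold Spec_bit_staffing; infer_instance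

-- ===== CLAIM (what is proved, stated in full; the proofs are below) =====
def Claim_equal_bit_staffing : Prop := ∀ (data : String), Dom_bit_staffing data → Spec_bit_staffing data (bit_staffing data)

-- ===== LEMMAS AND PROOFS =====

-- what both programs compute on the tail t = data[8:], written front-to-back
def pvG (t : List Char) : List Char :=
  if h : PySem.Chars.find t pvFlag = -1 then []
  else t.take (PySem.Chars.find t pvFlag).toNat ++ pvNewFlag
        ++ pvG (t.drop ((PySem.Chars.find t pvFlag).toNat + 8))
termination_by t.length
decreasing_by
  have h8 : (8:Nat) ≤ t.length := by
    have := ((PySem.Chars.find_ne_neg_one_iff t pvFlag).mp h).length_le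
    simpa [pvFlag] using this
  simp only [List.length_drop]
  omega

-- the leftmost-nonoverlapping decomposition that CPython's str.split performs
def pvSplitRec (t : List Char) : List (List Char) :=
  if h : PySem.Chars.find t pvFlag = -1 then [t]
  else t.take (PySem.Chars.find t pvFlag).toNat
        :: pvSplitRec (t.drop ((PySem.Chars.find t pvFlag).toNat + 8))
termination_by t.length
decreasing_by
  have h8 : (8:Nat) ≤ t.length := by
    have := ((PySem.Chars.find_ne_neg_one_iff t pvFlag).mp h).length_le
    simpa [pvFlag] using this
  simp only [List.length_drop]
  omega

theorem pvSplitRec_eq (t : List Char) :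
    pvSplitRec t = (if PySem.Chars.find t pvFlag = -1 then [t]
      else t.take (PySem.Chars.find t pvFlag).toNat
            :: pvSplitRec (t.drop ((PySem.Chars.find t pvFlag).toNat + 8))) := by
  rw [pvSplitRec]
  split <;> rfl

theorem pvSplitRec_ne_nil (t : List Char) : pvSplitRec t ≠ [] := by
  rw [pvSplitRec]; split <;> simp

theorem pvG_nil : pvG [] = [] := by
  rw [pvG]; simp [show PySem.Chars.find [] pvFlag = -1 by decide]

-- find.go with counter k is find shifted by k
theorem pvFindGo_shift (sub : List Char) : ∀ (l : List Char) (k : Nat),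
    PySem.Chars.find.go sub l k =
      if PySem.Chars.find l sub = -1 then -1 else (k : Int) + PySem.Chars.find l sub := by
  intro l
  induction l with
  | nil =>
    intro k
    simp only [PySem.Chars.find, PySem.Chars.find.go]
    split <;> simp_all
  | cons c rest ih =>
    intro k
    conv_lhs => rw [PySem.Chars.find.go]
    by_cases hp : sub.isPrefixOf (c :: rest)
    · rw [if_pos hp]
      have hc : PySem.Chars.find (c :: rest) sub = 0 := by
        show PySem.Chars.find.go sub (c :: rest) 0 = 0
        rw [PySem.Chars.find.go]; simp [hp]
      rw [hc]
      norm_num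
    · rw [if_neg hp, ih (k + 1)]
      have hc : PySem.Chars.find (c :: rest) sub
          = if PySem.Chars.find rest sub = -1 then -1 else 1 + PySem.Chars.find rest sub := by
        show PySem.Chars.find.go sub (c :: rest) 0 = _
        rw [PySem.Chars.find.go, if_neg hp, ih 1]
        norm_cast
      rw [hc]
      have := PySem.Chars.neg_one_le_find rest sub
      split_ifs <;> push_cast <;> omega

theorem pvFind_cons_not_prefix (c : Char) (rest sub : List Char) (h : ¬ sub.isPrefixOf (c :: rest)) :
    PySem.Chars.find (c :: rest) sub =
      if PySem.Chars.find rest sub = -1 then -1 else 1 + PySem.Chars.find rest sub := by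
  simp only [PySem.Chars.find]
  rw [PySem.Chars.find.go, if_neg h]
  have := pvFindGo_shift sub rest 1
  simpa [PySem.Chars.find] using this

theorem pvFind_cons_prefix (c : Char) (rest sub : List Char) (h : sub.isPrefixOf (c :: rest)) :
    PySem.Chars.find (c :: rest) sub = 0 := by
  simp only [PySem.Chars.find]
  rw [PySem.Chars.find.go]
  simp [h]

-- head-modification helper for the split scan
def pvConsHead (p : List Char) (xs : List (List Char)) : List (List Char) :=
  match xs with
  | [] => [p]
  | h :: t => (p ++ h) :: t

theorem pvConsHead_nil (xs : List (List Char)) (h : xs ≠ []) : pvConsHead [] xs = xs := by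
  cases xs with
  | nil => exact absurd rfl h
  | cons a b => simp [pvConsHead]

theorem pvSplitRec_cons_not_prefix (c : Char) (rest : List Char)
    (hp : ¬ pvFlag.isPrefixOf (c :: rest)) (p : List Char) :
    pvConsHead (p ++ [c]) (pvSplitRec rest) = pvConsHead p (pvSplitRec (c :: rest)) := by
  have hstep := pvFind_cons_not_prefix c rest pvFlag hp
  by_cases hr : PySem.Chars.find rest pvFlag = -1
  · have h2 : PySem.Chars.find (c :: rest) pvFlag = -1 := by rw [hstep]; simp [hr]
    rw [pvSplitRec_eq rest, pvSplitRec_eq (c :: rest)]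
    simp [hr, h2, pvConsHead]
  · have hr0 : 0 ≤ PySem.Chars.find rest pvFlag := by
      have := PySem.Chars.neg_one_le_find rest pvFlag; omega
    simp only [if_neg hr] at hstep
    have hne : PySem.Chars.find (c :: rest) pvFlag ≠ -1 := by omega
    rw [pvSplitRec_eq rest, pvSplitRec_eq (c :: rest)]
    simp only [if_neg hr, if_neg hne, pvConsHead]
    have htn : (PySem.Chars.find (c :: rest) pvFlag).toNat
        = (PySem.Chars.find rest pvFlag).toNat + 1 := by omega
    rw [htn, List.take_succ_cons,
      show (PySem.Chars.find rest pvFlag).toNat + 1 + 8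
          = ((PySem.Chars.find rest pvFlag).toNat + 8) + 1 by omega,
      List.drop_succ_cons]
    simp

theorem pvSplitOnGo_spec : ∀ (fuel : Nat) (l cur : List Char) (acc : List (List Char)),
    l.length < fuel →
    PySem.Chars.splitOn.go pvFlag fuel l cur acc = acc.reverse ++ pvConsHead cur.reverse (pvSplitRec l) := by
  intro fuel
  induction fuel with
  | zero => intro l cur acc h; omega
  | succ n ih =>
    intro l cur acc h
    match l with
    | [] =>
      rw [PySem.Chars.splitOn.go]
      · rw [pvSplitRec]
        simp [show PySem.Chars.find ([] : List Char) pvFlag = -1 by decide, pvConsHead]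
      · omega
    | c :: rest =>
      by_cases hp : pvFlag.isPrefixOf (c :: rest)
      · rw [PySem.Chars.splitOn.go, if_pos hp]
        have hfl : pvFlag.length = 8 := by decide
        have hlen : 8 ≤ (c :: rest).length := by
          have := (List.isPrefixOf_iff_prefix.mp hp).length_le
          omega
        have hf : (List.drop pvFlag.length (c :: rest)).length < n := by
          simp only [List.length_drop, hfl]
          simp only [List.length_cons] at h hlen ⊢
          omega
        rw [ih _ _ _ hf]
        simp only [List.reverse_nil]
        rw [pvConsHead_nil _ (pvSplitRec_ne_nil _)]
        have hfind : PySem.Chars.find (c :: rest) pvFlag = 0 := pvFind_cons_prefix c rest pvFlag hp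
        conv_rhs => rw [pvSplitRec]
        simp only [hfind, hfl]
        simp [pvConsHead]
      · rw [PySem.Chars.splitOn.go, if_neg hp]
        have hf : rest.length < n := by simp only [List.length_cons] at h; omega
        rw [ih _ _ _ hf]
        rw [show (c :: cur).reverse = cur.reverse ++ [c] by simp]
        rw [pvSplitRec_cons_not_prefix c rest hp]

theorem pvSplitOn_eq (t : List Char) : PySem.Chars.splitOn t pvFlag = pvSplitRec t := by
  unfold PySem.Chars.splitOn
  rw [pvSplitOnGo_spec (t.length + 1) t [] [] (by omega)]
  simp [pvConsHead_nil _ (pvSplitRec_ne_nil t)]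

-- findFrom past the end of the string is -1
theorem pvFindFrom_of_gt (s sub : List Char) (st : Int) (h0 : 0 ≤ st) (h : (s.length : Int) < st) :
    PySem.Chars.findFrom s sub st none = -1 := by
  unfold PySem.Chars.findFrom
  split_ifs <;> simp_all
  omega

-- A's loop equals acc ++ pvG (tail of data from old_index), given enough fuel
theorem pvBitStaffingGo_eq (data : List Char) : ∀ (fuel : Nat) (oldIndex : Int) (acc : List Char),
    0 ≤ oldIndex → data.length + 8 ≤ 8 * fuel + oldIndex.toNat →
    bitStaffingGo data fuel acc oldIndex = acc ++ pvG (data.drop oldIndex.toNat) := by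
  intro fuel
  induction fuel with
  | zero =>
    intro old acc h0 hm
    show acc = acc ++ pvG (data.drop old.toNat)
    rw [List.drop_eq_nil_of_le (by omega), pvG_nil, List.append_nil]
  | succ n ih =>
    intro old acc h0 hm
    show (if PySem.Chars.findFrom data pvFlag old none = -1 then acc
          else bitStaffingGo data n
            (acc ++ PySem.List.slice data (some old) (some (PySem.Chars.findFrom data pvFlag old none)) ++ pvNewFlag)
            (PySem.Chars.findFrom data pvFlag old none + 8)) = acc ++ pvG (data.drop old.toNat)
    by_cases hk : old.toNat ≤ data.length
    · have hcast : old = ((old.toNat : Nat) : Int) := by omega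
      have hff := PySem.Chars.findFrom_natCast data pvFlag old.toNat hk
      by_cases hfind : PySem.Chars.find (List.drop old.toNat data) pvFlag = -1
      · have : PySem.Chars.findFrom data pvFlag old none = -1 := by
          rw [hcast, hff]; simp [hfind]
        rw [if_pos this]
        rw [pvG]
        simp [hfind]
      · have hr0 : 0 ≤ PySem.Chars.find (List.drop old.toNat data) pvFlag := by
          have := PySem.Chars.neg_one_le_find (List.drop old.toNat data) pvFlag; omega
        set r := PySem.Chars.find (List.drop old.toNat data) pvFlag with hrdef
        have hnew : PySem.Chars.findFrom data pvFlag old none = (old.toNat : Int) + r := by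
          rw [hcast, hff]; simp [hfind]
        rw [hnew, if_neg (show ((old.toNat : Int) + r) ≠ -1 by omega)]
        have hrlen : r ≤ (List.drop old.toNat data).length := by
          have := PySem.Chars.find_le_length (List.drop old.toNat data) pvFlag
          omega
        simp only [List.length_drop] at hrlen
        have hmeas : data.length + 8 ≤ 8 * n + ((old.toNat : Int) + r + 8).toNat := by omega
        rw [ih ((old.toNat : Int) + r + 8) _ (by omega) hmeas]
        have hslice : PySem.List.slice data (some old) (some ((old.toNat : Int) + r))
            = (List.drop old.toNat data).take r.toNat := by
          rw [PySem.List.slice_toNat data h0 (by omega)]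
          congr 1
          omega
        have hdrop : List.drop ((old.toNat : Int) + r + 8).toNat data
            = List.drop (r.toNat + 8) (List.drop old.toNat data) := by
          rw [List.drop_drop]
          congr 1
          omega
        rw [hslice, hdrop]
        conv_rhs => rw [pvG]
        simp only [dif_neg hfind, ← hrdef]
        simp [List.append_assoc]
    · have hgt : (data.length : Int) < old := by omega
      rw [if_pos (pvFindFrom_of_gt data pvFlag old h0 hgt)]
      rw [List.drop_eq_nil_of_le (by omega), pvG_nil, List.append_nil]

-- pvG is exactly B's split-then-join value
theorem pvG_eq_split (t : List Char) :
    pvG t = (if (pvSplitRec t).length = 1 then []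
             else PySem.Chars.join pvNewFlag (pvSplitRec t).dropLast ++ pvNewFlag) := by
  induction t using pvG.induct with
  | case1 t hfind =>
    rw [pvG, pvSplitRec]
    simp [hfind]
  | case2 t hfind ih =>
    rw [pvG, pvSplitRec]
    simp only [dif_neg hfind]
    obtain ⟨h', t', hst⟩ : ∃ h' t',
        pvSplitRec (t.drop ((PySem.Chars.find t pvFlag).toNat + 8)) = h' :: t' := by
      cases hsp : pvSplitRec (t.drop ((PySem.Chars.find t pvFlag).toNat + 8)) with
      | nil => exact absurd hsp (pvSplitRec_ne_nil _)
      | cons a b => exact ⟨a, b, rfl⟩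
    rw [hst] at ih ⊢
    cases t' with
    | nil =>
      rw [if_pos (by simp)] at ih
      rw [ih, if_neg (by simp)]
      simp [PySem.Chars.join_singleton]
    | cons b bs =>
      rw [if_neg (by simp), List.dropLast_cons₂] at ih
      rw [ih, if_neg (by simp), List.dropLast_cons₂, List.dropLast_cons₂,
        PySem.Chars.join_cons_cons]
      simp [List.append_assoc]

-- final equivalence
theorem pvMain (data : String) : bit_staffing data = bit_staffing_alt data := by
  unfold bit_staffing bit_staffing_alt
  rw [PySem.List.slice_from data.toList (by norm_num : (0:Int) ≤ 8), pvSplitOn_eq]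
  rw [pvBitStaffingGo_eq data.toList (data.toList.length + 1) 8 [] (by norm_num) (by simp; omega)]
  rw [show ((8:Int).toNat) = 8 from rfl]
  rw [List.nil_append, pvG_eq_split]
  show _ = if (pvSplitRec (List.drop 8 data.toList)).length = 1 then ""
           else String.ofList (PySem.Chars.join pvNewFlag (pvSplitRec (List.drop 8 data.toList)).dropLast ++ pvNewFlag)
  by_cases hc : (pvSplitRec (List.drop 8 data.toList)).length = 1
  · rw [if_pos hc, if_pos hc]
  · rw [if_neg hc, if_neg hc]

-- ===== VERDICT (by name: the statement is the Claim_ definition above) =====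
theorem bit_staffing_spec : Claim_equal_bit_staffing := by
  intro data _
  unfold Spec_bit_staffing
  exact pvMain data
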